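-- pv_equiv track=rewrite | github.com/songzy12/TopCoder-SRM | TCO/TCO 2019 China Regionals/A.py | actualFloor
-- ===== SOURCE A (Python) =====
-- def actualFloor(buttonPressed):
--     a = []
--     for i in range(100000+1):
--         if '4' in str(i):
--             continue
--         a.append(i)
--     m = {}
--     for i, j in enumerate(a):
--         m[j] = i
--     return m[buttonPressed]
-- ===== SOURCE B (Python) =====
-- def actualFloor(buttonPressed):
--     # digit-by-digit: floors skip any number containing a '4', so the index of a
--     # valid button is its decimal reading with each digit d>4 mapped to d-1, in base 9
--     res, p, n = 0, 1, buttonPressed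
--     while n > 0:
--         d = n % 10
--         res += (d - (d > 4)) * p
--         p *= 9
--         n //= 10
--     return res
-- ===== Notes on version B (the rewrite author's own statement) =====
-- stated objective: faster
-- what changed: Instead of enumerating all 100001 floor numbers and building a value-to-index dict, B computes the index directly from the digits of buttonPressed as a base-9-like value (digit d contributes d, or d-1 when d>4): O(log n) per call instead of O(N).
import Mathlib
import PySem

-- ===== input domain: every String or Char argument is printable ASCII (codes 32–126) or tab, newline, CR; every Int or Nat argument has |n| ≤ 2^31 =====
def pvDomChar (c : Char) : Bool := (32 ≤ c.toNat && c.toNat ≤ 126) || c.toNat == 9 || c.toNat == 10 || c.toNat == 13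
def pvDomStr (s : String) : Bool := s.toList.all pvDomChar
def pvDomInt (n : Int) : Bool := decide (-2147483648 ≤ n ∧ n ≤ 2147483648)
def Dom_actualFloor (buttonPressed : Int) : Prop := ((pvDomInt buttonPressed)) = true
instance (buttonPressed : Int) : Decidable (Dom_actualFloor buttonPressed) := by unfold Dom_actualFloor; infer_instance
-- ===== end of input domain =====

-- ===== PORT A =====
-- B replaces A's full 0..100000 table + value-to-index dict by a per-digit base-9-like conversion (faster).
def actualFloor (buttonPressed : Int) : Int :=
  -- a.append(i) is Python's O(1) destructive append: ported as Array.push (exact: same list, built left to right)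
  let a : List Int := ((PySem.List.pyRange 0 (100000 + 1)).foldl
    (fun acc i => if PySem.Str.isIn "4" (PySem.Int.toStr i) then acc else acc.push i) #[]).toList
  -- for i, j in enumerate(a): m[j] = i  — every key j is fresh (a has no duplicates, see a's Nodup in the
  -- proofs), so the dict is exactly this association list with first-match lookup; enumerate's counter is st.2
  let m : List (Int × Int) := (a.foldl
    (fun (st : List (Int × Int) × Int) j => ((j, st.2) :: st.1, st.2 + 1)) ([], 0)).1
  -- m[buttonPressed]; the KeyError case (key absent) is excluded by Pre_
  (m.lookup buttonPressed).getD 0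

-- ===== PORT B =====
-- Source B loop: while n > 0: d = n % 10; res += (d - (d > 4)) * p; p *= 9; n //= 10
-- (n stays ≥ 0 inside Pre_, so Python's // and % on it are Nat division/mod; for n ≤ 0 the body never runs)
def altGo (n p res : Nat) : Nat :=
  if h : n = 0 then res
  else altGo (n / 10) (p * 9) (res + (n % 10 - (if n % 10 > 4 then 1 else 0)) * p)
termination_by n
decreasing_by exact Nat.div_lt_self (Nat.pos_of_ne_zero h) (by omega)

def actualFloor_alt (buttonPressed : Int) : Int :=
  Int.ofNat (altGo buttonPressed.toNat 1 0)

-- ===== PRECONDITION & SPEC =====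
-- true iff the decimal digits of n contain a 4 (fuel-structured so that `decide` can evaluate it)
def hasFourAux : Nat → Nat → Bool
  | 0, _ => false
  | f + 1, n => if n = 0 then false else ((n % 10 == 4) || hasFourAux f (n / 10))

def hasFourDigit (n : Nat) : Bool := hasFourAux n n

-- Pre_: exactly the keys of A's dict — 0..100000 with no decimal digit 4; on any other input A raises KeyError.
def Pre_actualFloor (buttonPressed : Int) : Prop :=
  0 ≤ buttonPressed ∧ buttonPressed ≤ 100000 ∧ hasFourDigit buttonPressed.toNat = false
instance (buttonPressed : Int) : Decidable (Pre_actualFloor buttonPressed) := by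
  unfold Pre_actualFloor; infer_instance
def pvWitness_actualFloor : Int := (12359)

def Spec_actualFloor (buttonPressed : Int) (out : Int) : Prop := out = actualFloor_alt buttonPressed
instance (buttonPressed : Int) (out : Int) : Decidable (Spec_actualFloor buttonPressed out) := by unfold Spec_actualFloor; infer_instance

-- ===== CLAIM (what is proved, stated in full; the proofs are below) =====
def Claim_equal_actualFloor : Prop := ∀ (buttonPressed : Int), Dom_actualFloor buttonPressed → Pre_actualFloor buttonPressed → Spec_actualFloor buttonPressed (actualFloor buttonPressed)

-- ===== LEMMAS AND PROOFS =====

lemma hasFourAux_congr : ∀ f f' n, n ≤ f → n ≤ f' → hasFourAux f n = hasFourAux f' n := by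
  intro f
  induction f with
  | zero =>
    intro f' n h _
    have : n = 0 := by omega
    cases f' <;> simp [this, hasFourAux]
  | succ f ih =>
    intro f' n h h'
    cases f' with
    | zero =>
      have : n = 0 := by omega
      simp [this, hasFourAux]
    | succ f' =>
      by_cases h0 : n = 0
      · simp [h0, hasFourAux]
      · simp only [hasFourAux, if_neg h0]
        rw [ih f' (n / 10) (by omega) (by omega)]

lemma hasFourDigit_eq (n : Nat) :
    hasFourDigit n = if n = 0 then false else ((n % 10 == 4) || hasFourDigit (n / 10)) := by
  by_cases h0 : n = 0
  · simp [h0, hasFourDigit, hasFourAux]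
  · rw [if_neg h0]
    show hasFourAux n n = _
    cases n with
    | zero => exact absurd rfl h0
    | succ m =>
      simp only [hasFourAux, if_neg h0]
      rw [hasFourAux_congr m (m.succ / 10) (m.succ / 10) (by omega) (le_refl _)]
      rfl

-- the count of 4-free numbers below n: the index A's table assigns to a 4-free n
def cnt (n : Nat) : Nat := (List.range n).countP (fun m => !hasFourDigit m)

-- the value B computes, as plain structural recursion on the digits
def b9 (n : Nat) : Nat :=
  if h : n = 0 then 0 else 9 * b9 (n / 10) + (n % 10 - (if n % 10 > 4 then 1 else 0))
termination_by n
decreasing_by exact Nat.div_lt_self (Nat.pos_of_ne_zero h) (by omega)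

lemma hasFour_mul10 (q r : Nat) (hr : r < 10) :
    hasFourDigit (10 * q + r) = ((r == 4) || hasFourDigit q) := by
  rw [hasFourDigit_eq]
  by_cases h0 : 10 * q + r = 0
  · have hq : q = 0 := by omega
    have hr0 : r = 0 := by omega
    subst hq hr0
    decide
  · have h1 : (10 * q + r) % 10 = r := by omega
    have h2 : (10 * q + r) / 10 = q := by omega
    rw [if_neg h0]
    simp only [h1, h2]

lemma hasFour_zero : hasFourDigit 0 = false := rfl

lemma count_notFour (r : Nat) (h : r ≤ 10) :
    (List.range r).countP (fun j => !(j == 4)) = r - (if r > 4 then 1 else 0) := by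
  interval_cases r <;> decide

lemma cnt_succ (n : Nat) : cnt (n + 1) = cnt n + (if hasFourDigit n then 0 else 1) := by
  simp [cnt, List.range_succ, List.countP_append, List.countP_cons]
  cases h : hasFourDigit n <;> simp

lemma cnt_add (n k : Nat) :
    cnt (n + k) = cnt n + (List.range k).countP (fun j => !hasFourDigit (n + j)) := by
  simp [cnt, List.range_add, List.countP_append, List.countP_map]; rfl

lemma cnt_mul10 (q : Nat) : cnt (10 * q) = 9 * cnt q := by
  induction q with
  | zero => simp [cnt]
  | succ q ih =>
    have e : 10 * (q + 1) = 10 * q + 10 := by ring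
    rw [e, cnt_add, ih, cnt_succ]
    have hc : (List.range 10).countP (fun j => !hasFourDigit (10 * q + j))
        = (List.range 10).countP (fun j => !((j == 4) || hasFourDigit q)) := by
      apply List.countP_congr
      intro j hj
      rw [List.mem_range] at hj
      rw [hasFour_mul10 q j hj]
    rw [hc]
    cases h : hasFourDigit q
    · simp only [h, Bool.or_false]
      rw [count_notFour 10 (by omega)]
      simp
      ring
    · simp only [h, Bool.or_true, if_pos rfl]
      simp

lemma cnt_mul10_add (q r : Nat) (hr : r < 10) :
    cnt (10 * q + r) = 9 * cnt q +
      (if hasFourDigit q then 0 else r - (if r > 4 then 1 else 0)) := by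
  rw [cnt_add, cnt_mul10]
  congr 1
  have hc : (List.range r).countP (fun j => !hasFourDigit (10 * q + j))
      = (List.range r).countP (fun j => !((j == 4) || hasFourDigit q)) := by
    apply List.countP_congr
    intro j hj
    rw [List.mem_range] at hj
    rw [hasFour_mul10 q j (by omega)]
  rw [hc]
  cases h : hasFourDigit q
  · simp only [h, Bool.or_false, if_neg Bool.false_ne_true]
    exact count_notFour r (by omega)
  · simp [h]

lemma cnt_eq_b9 (n : Nat) (h : hasFourDigit n = false) : cnt n = b9 n := by
  induction n using Nat.strong_induction_on with
  | _ n ih =>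
    by_cases h0 : n = 0
    · subst h0; rw [b9]; simp [cnt]
    · have hd : n = 10 * (n / 10) + n % 10 := by omega
      have hm : n % 10 < 10 := by omega
      have h4 : hasFourDigit (n / 10) = false ∧ (n % 10 == 4) = false := by
        rw [hd, hasFour_mul10 _ _ hm] at h
        simp at h
        simp [h]
      rw [b9, dif_neg h0]
      conv_lhs => rw [hd]
      rw [cnt_mul10_add _ _ hm, h4.1,
        ih (n / 10) (Nat.div_lt_self (Nat.pos_of_ne_zero h0) (by omega)) h4.1]
      simp

lemma altGo_eq (n : Nat) : ∀ p res, altGo n p res = res + p * b9 n := by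
  induction n using Nat.strong_induction_on with
  | _ n ih =>
    intro p res
    by_cases h0 : n = 0
    · subst h0; rw [altGo, b9]; simp
    · rw [altGo, dif_neg h0, b9, dif_neg h0,
        ih (n / 10) (Nat.div_lt_self (Nat.pos_of_ne_zero h0) (by omega))]
      ring

lemma digitChar_eq_four (r : Nat) (h : r < 10) : (Nat.digitChar r = '4') = (r = 4) := by
  interval_cases r <;> simp_all <;> decide

lemma mem_toDigitsCore (f : Nat) : ∀ (n : Nat) (acc : List Char), n < 10 ^ f →
    ('4' ∈ Nat.toDigitsCore 10 f n acc ↔ hasFourDigit n = true ∨ '4' ∈ acc) := by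
  induction f with
  | zero =>
    intro n acc hn
    have : n = 0 := by omega
    subst this
    simp [Nat.toDigitsCore, hasFour_zero]
  | succ f ih =>
    intro n acc hn
    have hio : ('4' = (n % 10).digitChar) ↔ (n % 10 = 4) := by
      rw [eq_comm, digitChar_eq_four (n % 10) (by omega)]
    rw [Nat.toDigitsCore]
    by_cases hq : n / 10 = 0
    · rw [if_pos (by simp [hq])]
      simp only [List.mem_cons, hio]
      by_cases h0 : n = 0
      · subst h0
        rw [hasFour_zero]
        simp
      · rw [hasFourDigit_eq, if_neg h0, hq, hasFour_zero]
        simp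
    · rw [if_neg (by simp [hq])]
      have h0 : n ≠ 0 := by omega
      have hlt : n / 10 < 10 ^ f := by
        rw [Nat.pow_succ] at hn
        exact Nat.div_lt_of_lt_mul (by omega)
      rw [ih (n / 10) _ hlt]
      simp only [List.mem_cons, hio]
      conv_rhs => rw [hasFourDigit_eq, if_neg h0]
      simp only [Bool.or_eq_true, beq_iff_eq]
      tauto

lemma isIn_toStr (m : Nat) :
    PySem.Str.isIn "4" (PySem.Int.toStr (m : Int)) = hasFourDigit m := by
  have hinf : PySem.Str.isIn "4" (PySem.Int.toStr (m : Int)) = true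
      ↔ hasFourDigit m = true := by
    rw [PySem.Str.isIn_iff_infix, PySem.Int.toList_toStr]
    have : PySem.Int.toChars (m : Int) = Nat.toDigits 10 m := by
      simp [PySem.Int.toChars]
    rw [this]
    have hm : m < 10 ^ (m + 1) :=
      lt_of_lt_of_le (Nat.lt_pow_self (by norm_num))
        (Nat.pow_le_pow_right (by norm_num) (by omega))
    have := mem_toDigitsCore (m + 1) m [] hm
    have h4 : "4".toList = ['4'] := rfl
    rw [h4, List.singleton_infix_iff]
    show ('4' ∈ Nat.toDigitsCore 10 (m + 1) m []) ↔ _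
    rw [this]
    simp
  cases hb : hasFourDigit m
  · cases hc : PySem.Str.isIn "4" (PySem.Int.toStr (m : Int))
    · rfl
    · rw [hb] at hinf; simpa using hinf.mp hc
  · exact hinf.mpr hb

lemma lookup_fold_not_mem (x : Int) :
    ∀ (t : List Int) (s : Int) (m0 : List (Int × Int)), x ∉ t →
    ((t.foldl (fun (st : List (Int × Int) × Int) j => ((j, st.2) :: st.1, st.2 + 1)) (m0, s)).1).lookup x
      = m0.lookup x := by
  intro t
  induction t with
  | nil => intro s m0 _; rfl
  | cons y t ih =>
    intro s m0 hx
    simp only [List.foldl_cons]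
    rw [ih (s + 1) ((y, s) :: m0) (by simp at hx; exact hx.2)]
    have hne : (x == y) = false := by
      simp only [List.mem_cons, not_or] at hx
      exact beq_eq_false_iff_ne.mpr hx.1
    simp [List.lookup, hne]

lemma lookup_fold_idxOf (x : Int) :
    ∀ (t : List Int) (s : Int) (m0 : List (Int × Int)), x ∈ t → t.Nodup →
    ((t.foldl (fun (st : List (Int × Int) × Int) j => ((j, st.2) :: st.1, st.2 + 1)) (m0, s)).1).lookup x
      = some (s + (t.idxOf x : Int)) := by
  intro t
  induction t with
  | nil => intro s m0 hx; cases hx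
  | cons y t ih =>
    intro s m0 hx hnd
    simp only [List.foldl_cons]
    by_cases hxy : x = y
    · subst hxy
      rw [lookup_fold_not_mem x t (s + 1) _ (by simp at hnd; exact hnd.1)]
      simp [List.lookup, List.idxOf_cons_self]
    · have hxt : x ∈ t := by
        cases hx with
        | head => exact absurd rfl hxy
        | tail _ h => exact h
      rw [ih (s + 1) _ hxt (by simp at hnd; exact hnd.2)]
      rw [List.idxOf_cons_ne _ (by exact fun h => hxy h.symm)]
      push_cast
      ring_nf

lemma push_fold_toList (P : Int → Bool) :
    ∀ (l : List Int) (acc : Array Int),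
    (l.foldl (fun acc i => if P i then acc else acc.push i) acc).toList
      = acc.toList ++ l.filter (fun i => !P i) := by
  intro l
  induction l with
  | nil => intro acc; simp
  | cons y t ih =>
    intro acc
    simp only [List.foldl_cons, List.filter_cons]
    cases h : P y <;> simp [h, ih]

theorem mainGlue (bp : Int) (h0 : 0 ≤ bp) (h1 : bp ≤ 100000)
    (h4 : hasFourDigit bp.toNat = false) :
    actualFloor bp = Int.ofNat (altGo bp.toNat 1 0) := by
  have hb : bp = ((bp.toNat : Nat) : Int) := by omega
  set P : Int → Bool := fun i => PySem.Str.isIn "4" (PySem.Int.toStr i) with hP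
  have hPn : ∀ m : Nat, P ((m : Nat) : Int) = hasFourDigit m := fun m => isIn_toStr m
  unfold actualFloor
  rw [push_fold_toList P]
  simp only [Array.toList_empty, List.nil_append]
  set a : List Int := (PySem.List.pyRange 0 (100000 + 1)).filter (fun i => !P i) with ha
  have hnd : a.Nodup := (PySem.List.nodup_pyRange_one 0 (100000 + 1)).filter _
  have hmem : bp ∈ a := by
    rw [ha, List.mem_filter]
    refine ⟨PySem.List.mem_pyRange_one.mpr ⟨h0, by omega⟩, ?_⟩
    rw [hb, hPn, h4]
    rfl
  rw [lookup_fold_idxOf bp a 0 [] hmem hnd]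
  simp only [Option.getD_some]
  -- idxOf bp a = cnt bp.toNat
  have hsplit : (PySem.List.pyRange 0 (100000 + 1) : List Int)
      = PySem.List.pyRange 0 bp ++ PySem.List.pyRange bp (100000 + 1) :=
    PySem.List.pyRange_one_append 0 bp (100000 + 1) h0 (by omega)
  have hcons : (PySem.List.pyRange bp (100000 + 1) : List Int)
      = bp :: PySem.List.pyRange (bp + 1) (100000 + 1) :=
    PySem.List.pyRange_one_cons (by omega)
  have hPbp : (!P bp) = true := by rw [hb, hPn, h4]; rfl
  have hnotmem : bp ∉ (PySem.List.pyRange 0 bp).filter (fun i => !P i) := by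
    intro hmem'
    have := PySem.List.mem_pyRange_one.mp (List.mem_filter.mp hmem').1
    omega
  have hidx : a.idxOf bp = ((PySem.List.pyRange 0 bp).filter (fun i => !P i)).length := by
    rw [ha, hsplit, List.filter_append, hcons]
    simp only [List.filter_cons, hPbp, if_true]
    simp [List.idxOf_append, hnotmem]
  -- filter length = cnt
  have hrange : (PySem.List.pyRange 0 bp : List Int)
      = (List.range bp.toNat).map (fun (k : Nat) => (k : Int)) := by
    rw [hb]; exact PySem.List.pyRange_zero_nat bp.toNat
  have hlen : ((PySem.List.pyRange 0 bp).filter (fun i => !P i)).length = cnt bp.toNat := by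
    rw [hrange, ← List.countP_eq_length_filter, List.countP_map, cnt]
    apply List.countP_congr
    intro m _
    simp only [Function.comp_apply, hPn m]
  rw [hidx, hlen, altGo_eq, cnt_eq_b9 _ h4]
  simp

-- ===== VERDICT (by name: the statement is the Claim_ definition above) =====
theorem actualFloor_spec : Claim_equal_actualFloor := by
  intro bp _ hpre
  obtain ⟨h0, h1, h4⟩ := hpre
  show actualFloor bp = actualFloor_alt bp
  rw [mainGlue bp h0 h1 h4]
  rfl
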